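-- pv_equiv track=rewrite | github.com/zqp542375/gensel | fdg/control/llm_related.py | prune_candidate_sequences_PS
-- ===== SOURCE A (Python) =====
-- def prune_candidate_sequences_PS(candidate_sequences_dict,generated_sequences_dict,num_candi):
--     """
--     keep sequences based on the past generated sequences
--     take advantage of the sequences generated. there should be some reasons or logic.
--     """
--     def contain_a_subet(sequence,subset_list):
--         for subset in subset_list:
--             if set(subset).issubset(set(sequence)):
--                 return True
--         return False
--
--     def contain_a_subet0(sequence,subset):
--         if set(subset).issubset(set(sequence)):
--             return True
--         return False
--
--     def need_to_prune(sequences_dict, num_candi):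
--         sequences=[s for seq_list in sequences_dict.values() for s in seq_list]
--         if len(sequences)<num_candi:
--             return False
--         else:
--             return True
--
--     results={}
--     for target, candi_dict in candidate_sequences_dict.items():
--         if not need_to_prune(candi_dict,num_candi):
--             results[target] = candi_dict
--             continue
--
--         d_seq={}
--         if target in generated_sequences_dict.keys():
--             seq_generated = generated_sequences_dict[target]
--             seq_generated=[ seq_generated[0:i] for i in range(1,len(seq_generated),1)]
--         else:
--             seq_generated = []
--         if len(seq_generated)>0:
--             for d,seq_list in candi_dict.items():
--                 seq_left = []
--                 for s in seq_list:
--                     if contain_a_subet(s,seq_generated):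
--                         seq_left.append(s)
--                 d_seq[d]=seq_left
--         else:
--             d_seq=candi_dict
--
--         results[target]=d_seq
--     return results
-- ===== SOURCE B (Python) =====
-- def prune_candidate_sequences_PS(candidate_sequences_dict, generated_sequences_dict, num_candi):
--     # The generated prefixes are nested, so "some prefix's set is a subset of set(s)"
--     # collapses to "the first generated element occurs in s".
--     results = {}
--     for target, candi_dict in candidate_sequences_dict.items():
--         total = sum(len(v) for v in candi_dict.values())
--         gen = generated_sequences_dict.get(target)
--         if total < num_candi or gen is None or len(gen) < 2:
--             results[target] = candi_dict
--         else:
--             first = gen[0]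
--             results[target] = {d: [s for s in seqs if first in s]
--                                for d, seqs in candi_dict.items()}
--     return results
-- ===== Notes on version B (the rewrite author's own statement) =====
-- stated objective: alternative
-- what changed: The scan over all nested generated prefixes with per-prefix set construction and subset tests collapses to one membership test of the first generated element per candidate sequence, and the flatten-then-len pruning test becomes a sum of lengths.
import Mathlib
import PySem

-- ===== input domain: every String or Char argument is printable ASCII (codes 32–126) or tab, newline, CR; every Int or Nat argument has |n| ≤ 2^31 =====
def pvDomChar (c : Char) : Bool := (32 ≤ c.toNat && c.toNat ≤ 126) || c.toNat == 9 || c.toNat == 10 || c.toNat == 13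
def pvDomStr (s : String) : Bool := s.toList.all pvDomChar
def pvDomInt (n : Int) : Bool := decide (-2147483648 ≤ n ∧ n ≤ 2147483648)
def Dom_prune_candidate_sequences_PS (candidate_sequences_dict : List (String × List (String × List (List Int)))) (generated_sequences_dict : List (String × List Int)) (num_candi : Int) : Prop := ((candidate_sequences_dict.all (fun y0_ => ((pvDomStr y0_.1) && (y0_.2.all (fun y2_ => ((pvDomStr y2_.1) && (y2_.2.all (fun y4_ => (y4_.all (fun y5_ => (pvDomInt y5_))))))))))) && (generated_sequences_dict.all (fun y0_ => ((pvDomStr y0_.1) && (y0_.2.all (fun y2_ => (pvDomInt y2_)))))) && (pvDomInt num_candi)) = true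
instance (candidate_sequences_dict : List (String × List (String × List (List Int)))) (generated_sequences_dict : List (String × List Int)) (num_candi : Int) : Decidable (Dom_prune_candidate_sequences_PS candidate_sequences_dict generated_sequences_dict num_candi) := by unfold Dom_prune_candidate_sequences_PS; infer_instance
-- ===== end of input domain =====

-- B replaces the nested prefix/subset scan by a single membership test of the first generated element; return values are identical.


-- ===== PORT A =====
-- Port of A. Transliteration: contain_a_subet / need_to_prune helpers, results dict built in a fold.
def pvContainASubet (sequence : List Int) (subset_list : List (List Int)) : Bool :=
  subset_list.any (fun subset => PySem.Set.issubset (PySem.Set.ofList subset) (PySem.Set.ofList sequence))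

def pvNeedToPrune (sequences_dict : List (String × List (List Int))) (num_candi : Int) : Bool :=
  if ((sequences_dict.flatMap (fun p => p.2)).length : Int) < num_candi then false else true

def pvStepA (generated_sequences_dict : List (String × List Int)) (num_candi : Int)
    (results : PySem.Dict String (List (String × List (List Int))))
    (tc : String × List (String × List (List Int))) :
    PySem.Dict String (List (String × List (List Int))) :=
  if pvNeedToPrune tc.2 num_candi = false then results.insert tc.1 tc.2
  else
    let seq_generated : List (List Int) :=
      match generated_sequences_dict.find? (fun p => p.1 == tc.1) with
      | some p => (PySem.List.pyRange 1 (p.2.length : Int) 1).map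
          (fun i => PySem.List.slice p.2 (some 0) (some i))
      | none => []
    if 0 < seq_generated.length then
      results.insert tc.1 (tc.2.foldl (fun d_seq dp =>
        d_seq ++ [(dp.1, dp.2.foldl (fun seq_left s =>
          if pvContainASubet s seq_generated then seq_left ++ [s] else seq_left) [])]) [])
    else results.insert tc.1 tc.2

def prune_candidate_sequences_PS (candidate_sequences_dict : List (String × List (String × List (List Int)))) (generated_sequences_dict : List (String × List Int)) (num_candi : Int) : List (String × List (String × List (List Int))) :=
  (candidate_sequences_dict.foldl (pvStepA generated_sequences_dict num_candi) PySem.Dict.empty).items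

-- ===== PORT B =====
-- Port of B: the nested generated prefixes collapse to a membership test of the first generated
-- element, so each kept entry is a single filter; one sum replaces the flattening length test.
def pvStepB (generated_sequences_dict : List (String × List Int)) (num_candi : Int)
    (results : PySem.Dict String (List (String × List (List Int))))
    (tc : String × List (String × List (List Int))) :
    PySem.Dict String (List (String × List (List Int))) :=
  let total : Int := (tc.2.map (fun p => (p.2.length : Int))).sum
  match (generated_sequences_dict.find? (fun p => p.1 == tc.1)).map (fun p => p.2) with
  | none => results.insert tc.1 tc.2
  | some g =>
    if total < num_candi ∨ g.length < 2 then results.insert tc.1 tc.2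
    else
      let first := g.headI
      results.insert tc.1 (tc.2.map (fun dp => (dp.1, dp.2.filter (fun s => s.contains first))))

def prune_candidate_sequences_PS_alt (candidate_sequences_dict : List (String × List (String × List (List Int)))) (generated_sequences_dict : List (String × List Int)) (num_candi : Int) : List (String × List (String × List (List Int))) :=
  (candidate_sequences_dict.foldl (pvStepB generated_sequences_dict num_candi) PySem.Dict.empty).items

-- ===== PRECONDITION & SPEC =====
def Spec_prune_candidate_sequences_PS (candidate_sequences_dict : List (String × List (String × List (List Int)))) (generated_sequences_dict : List (String × List Int)) (num_candi : Int) (out : List (String × List (String × List (List Int)))) : Prop := out = prune_candidate_sequences_PS_alt candidate_sequences_dict generated_sequences_dict num_candi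
instance (candidate_sequences_dict : List (String × List (String × List (List Int)))) (generated_sequences_dict : List (String × List Int)) (num_candi : Int) (out : List (String × List (String × List (List Int)))) : Decidable (Spec_prune_candidate_sequences_PS candidate_sequences_dict generated_sequences_dict num_candi out) := by unfold Spec_prune_candidate_sequences_PS; infer_instance

-- ===== CLAIM (what is proved, stated in full; the proofs are below) =====
def Claim_equal_prune_candidate_sequences_PS : Prop := ∀ (candidate_sequences_dict : List (String × List (String × List (List Int)))) (generated_sequences_dict : List (String × List Int)) (num_candi : Int), Dom_prune_candidate_sequences_PS candidate_sequences_dict generated_sequences_dict num_candi → Spec_prune_candidate_sequences_PS candidate_sequences_dict generated_sequences_dict num_candi (prune_candidate_sequences_PS candidate_sequences_dict generated_sequences_dict num_candi)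

-- ===== LEMMAS AND PROOFS =====
lemma total_eq (l : List (String × List (List Int))) :
    ((l.flatMap (fun p => p.2)).length : Int) = (l.map (fun p => (p.2.length : Int))).sum := by
  induction l with
  | nil => simp
  | cons h t ih => simp only [List.flatMap_cons, List.length_append, List.map_cons, List.sum_cons, Nat.cast_add, ih]

lemma contain_eq (g : List Int) (hg : 2 ≤ g.length) (s : List Int) :
    pvContainASubet s ((PySem.List.pyRange 1 (g.length : Int) 1).map
      (fun i => PySem.List.slice g (some 0) (some i))) = s.contains g.headI := by
  match g, hg with
  | g0 :: rest, hg =>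
  rw [Bool.eq_iff_iff]
  simp only [pvContainASubet, List.any_eq_true, List.mem_map, PySem.List.mem_pyRange_one,
    List.contains_iff_mem, List.headI, PySem.Set.issubset_iff, PySem.Set.mem_ofList,
    PySem.List.slice_zero_start]
  constructor
  · rintro ⟨_, ⟨i, ⟨h1, hlt⟩, rfl⟩, hsub⟩
    apply hsub
    rw [PySem.List.slice_to _ (by omega)]
    have h : i.toNat = (i.toNat - 1) + 1 := by omega
    rw [h, List.take_succ_cons]
    exact List.mem_cons_self
  · intro hm
    refine ⟨_, ⟨1, ⟨le_refl _, by simpa using hg⟩, rfl⟩, ?_⟩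
    intro x hx
    rw [PySem.List.slice_to _ (by norm_num)] at hx
    norm_num [List.take_succ_cons] at hx
    simpa [hx] using hm

lemma step_eq (gd : List (String × List Int)) (n : Int)
    (res : PySem.Dict String (List (String × List (List Int))))
    (tc : String × List (String × List (List Int))) :
    pvStepA gd n res tc = pvStepB gd n res tc := by
  unfold pvStepA pvStepB pvNeedToPrune
  rw [total_eq]
  by_cases hlt : (tc.2.map (fun p => (p.2.length : Int))).sum < n
  · cases h : (gd.find? (fun p => p.1 == tc.1)) with
    | none => simp [hlt]
    | some p => simp [hlt]
  · cases h : (gd.find? (fun p => p.1 == tc.1)) with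
    | none => simp [hlt]
    | some p =>
      simp only [Option.map_some]
      by_cases hlen : p.2.length < 2
      · have he : PySem.List.pyRange 1 (p.2.length : Int) 1 = [] :=
          PySem.List.pyRange_one_eq_nil (by exact_mod_cast by omega)
        simp [he, hlt, hlen]
      · simp only [contain_eq p.2 (by omega)]
        simp only [PySem.List.foldl_append_if, PySem.List.foldl_append_singleton_eq_map,
          List.nil_append]
        have hlen' : ¬ p.2.length ≤ 1 := by omega
        simp [hlt, hlen, hlen']

lemma step_eq_fun (gd : List (String × List Int)) (n : Int) :
    pvStepA gd n = pvStepB gd n :=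
  funext fun res => funext fun tc => step_eq gd n res tc


-- ===== VERDICT (by name: the statement is the Claim_ definition above) =====
theorem prune_candidate_sequences_PS_spec : Claim_equal_prune_candidate_sequences_PS := by
  intro cd gd n _
  show _ = _
  unfold prune_candidate_sequences_PS prune_candidate_sequences_PS_alt
  rw [step_eq_fun gd n]
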